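-- pv_equiv track=rewrite | github.com/carolinaaaaa7/ATP2022 | obras22.py | distribuicao
-- ===== SOURCE A (Python) =====
-- def distribuicao (lista, indice, amplitude):
--     #se amplitude= 0 nao tem min nem max, ou seja, sem intervalo
--     d={}
--     for obra in lista:
--         if amplitude != 0:
--             min = (int(obra[indice])//amplitude) * amplitude
--             max = min + amplitude -1
--             intervalo = "[" + str(min)+ "-" + str(max) + "]"
--         else:
--             intervalo = "[ " + str(obra[indice]) + " ]"
--         if intervalo in d:
--             d[intervalo] += 1
--         else:
--             d[intervalo] = 1
--     d= dict(sorted(d.items()))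
--     return d
-- ===== SOURCE B (Python) =====
-- def chave(obra, indice, amplitude):
--     if amplitude != 0:
--         minimo = (int(obra[indice]) // amplitude) * amplitude
--         return "[" + str(minimo) + "-" + str(minimo + amplitude - 1) + "]"
--     return "[ " + str(obra[indice]) + " ]"
--
-- def runs(xs):
--     if not xs:
--         return []
--     x = xs[0]
--     k = 1
--     while k < len(xs) and xs[k] == x:
--         k += 1
--     return [(x, k)] + runs(xs[k:])
--
-- def distribuicao(lista, indice, amplitude):
--     chaves = sorted(chave(obra, indice, amplitude) for obra in lista)
--     return dict(runs(chaves))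
-- ===== Notes on version B (the rewrite author's own statement) =====
-- stated objective: alternative
-- what changed: Replaces the hash-count-then-sort-items scheme by computing the interval key of every item into a list, sorting that list of keys, and run-length grouping consecutive equal keys into the result dict.
import Mathlib
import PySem

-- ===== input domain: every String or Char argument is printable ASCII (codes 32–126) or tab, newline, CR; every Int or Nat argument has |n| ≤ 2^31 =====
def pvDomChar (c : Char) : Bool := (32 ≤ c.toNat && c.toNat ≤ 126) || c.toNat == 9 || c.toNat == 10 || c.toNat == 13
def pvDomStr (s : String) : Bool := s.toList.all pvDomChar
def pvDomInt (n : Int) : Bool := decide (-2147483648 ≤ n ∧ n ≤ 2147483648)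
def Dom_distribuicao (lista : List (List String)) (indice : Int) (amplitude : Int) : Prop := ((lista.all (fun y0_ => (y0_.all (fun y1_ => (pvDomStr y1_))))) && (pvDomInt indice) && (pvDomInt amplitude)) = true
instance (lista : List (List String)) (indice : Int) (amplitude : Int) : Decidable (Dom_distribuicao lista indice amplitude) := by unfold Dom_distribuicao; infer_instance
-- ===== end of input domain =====

-- B replaces A's hash-count-then-sort-items scheme by sort-the-keys-then-group-runs (alternative decomposition, same cost class).

-- shared per-item key computation (both Pythons build the interval label with the same expressions)
def pvIntervalo (obra : List String) (indice : Int) (amplitude : Int) : String :=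
  let s := PySem.List.pyGetD obra indice ""   -- obra[indice]; exact under Pre_
  if amplitude ≠ 0 then
    let mn := PySem.Int.floordiv ((PySem.Int.ofStr? s).getD 0) amplitude * amplitude  -- int(...) exact under Pre_
    let mx := mn + amplitude - 1
    "[" ++ PySem.Int.toStr mn ++ "-" ++ PySem.Int.toStr mx ++ "]"
  else
    "[ " ++ s ++ " ]"

-- ===== PORT A =====
def distribuicao (lista : List (List String)) (indice : Int) (amplitude : Int) : List (String × Int) :=
  let d := lista.foldl (fun d obra =>
    let intervalo := pvIntervalo obra indice amplitude
    match d.get? intervalo with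
    | some n => d.insert intervalo (n + 1)
    | none   => d.insert intervalo 1) PySem.Dict.empty
  PySem.List.sorted2 d.items (fun kv => kv.1) (fun kv => kv.2) false

-- ===== PORT B =====
-- runs(xs): run-length grouping of consecutive equal keys (Source B's recursive helper)
def pvRuns : List String → List (String × Int)
  | [] => []
  | x :: t =>
    let k := 1 + (t.takeWhile (fun y => y == x)).length
    (x, (k : Int)) :: pvRuns (t.dropWhile (fun y => y == x))
  termination_by l => l.length
  decreasing_by simpa using Nat.lt_succ_of_le (List.length_dropWhile_le _ _)

def distribuicao_alt (lista : List (List String)) (indice : Int) (amplitude : Int) : List (String × Int) :=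
  let chaves := PySem.List.sorted (lista.map (fun obra => pvIntervalo obra indice amplitude)) (fun x => x) false
  pvRuns chaves

-- ===== PRECONDITION & SPEC =====
-- Pre_ excludes exactly the inputs where A raises: an obra for which indice is out of range
-- (IndexError), or — when amplitude ≠ 0 — whose entry is not int()-parsable (ValueError).
def Pre_distribuicao (lista : List (List String)) (indice : Int) (amplitude : Int) : Prop :=
  ∀ obra ∈ lista, PySem.Raise.InRange obra.length indice ∧
    (amplitude ≠ 0 → (PySem.Int.ofStr? (PySem.List.pyGetD obra indice "")).isSome = true)
instance (lista : List (List String)) (indice : Int) (amplitude : Int) : Decidable (Pre_distribuicao lista indice amplitude) := by unfold Pre_distribuicao; infer_instance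
def pvWitness_distribuicao : List (List String) × Int × Int := ([["3"], ["7"], ["3"]], 0, 2)

def Spec_distribuicao (lista : List (List String)) (indice : Int) (amplitude : Int) (out : List (String × Int)) : Prop := out = distribuicao_alt lista indice amplitude
instance (lista : List (List String)) (indice : Int) (amplitude : Int) (out : List (String × Int)) : Decidable (Spec_distribuicao lista indice amplitude out) := by unfold Spec_distribuicao; infer_instance

-- ===== CLAIM (what is proved, stated in full; the proofs are below) =====
def Claim_equal_distribuicao : Prop := ∀ (lista : List (List String)) (indice : Int) (amplitude : Int), Dom_distribuicao lista indice amplitude → Pre_distribuicao lista indice amplitude → Spec_distribuicao lista indice amplitude (distribuicao lista indice amplitude)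

-- ===== LEMMAS AND PROOFS =====

-- insertBy only looks at 'before' between the new element and list members
theorem pv_insertBy_congr {α : Type} (b1 b2 : α → α → Bool) (x : α) (ys : List α)
    (h : ∀ y ∈ ys, b1 x y = b2 x y) :
    PySem.List.insertBy b1 x ys = PySem.List.insertBy b2 x ys := by
  induction ys with
  | nil => rfl
  | cons y ys ih =>
    have hy := h y (by simp)
    simp only [PySem.List.insertBy, hy]
    split
    · rfl
    · rw [ih (fun z hz => h z (by simp [hz]))]

theorem pv_foldl_insertBy_congr {α : Type} (b1 b2 : α → α → Bool) (S : List α)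
    (H : ∀ x ∈ S, ∀ y ∈ S, b1 x y = b2 x y) :
    ∀ (l acc : List α), (∀ x ∈ l, x ∈ S) → (∀ y ∈ acc, y ∈ S) →
    l.foldl (fun a x => PySem.List.insertBy b1 x a) acc
      = l.foldl (fun a x => PySem.List.insertBy b2 x a) acc := by
  intro l
  induction l with
  | nil => intro acc _ _; rfl
  | cons x l ih =>
    intro acc hl hacc
    have hx : x ∈ S := hl x (by simp)
    simp only [List.foldl_cons]
    rw [pv_insertBy_congr b1 b2 x acc (fun y hy => H x hx y (hacc y hy))]
    exact ih _ (fun z hz => hl z (by simp [hz]))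
      (fun y hy => (PySem.List.mem_insertBy b2 x y acc).1 hy |>.elim (fun e => e ▸ hx) (hacc y))

-- Python's tuple sort on pairs with pairwise-distinct first components is the sort by first component
theorem pv_sorted2_eq_sorted {α κ₁ κ₂ : Type} [LinearOrder κ₁] [LinearOrder κ₂]
    (xs : List α) (k1 : α → κ₁) (k2 : α → κ₂)
    (h : ∀ x ∈ xs, ∀ y ∈ xs, k1 x = k1 y → x = y) :
    PySem.List.sorted2 xs k1 k2 false = PySem.List.sorted xs k1 false := by
  show xs.foldl (fun a x => PySem.List.insertBy
      (fun a b => decide (k1 a < k1 b) || (!decide (k1 b < k1 a) && decide (k2 a < k2 b))) x a) []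
    = xs.foldl (fun a x => PySem.List.insertBy (fun a b => decide (k1 a < k1 b)) x a) []
  apply pv_foldl_insertBy_congr _ _ xs _ xs [] (fun x hx => hx) (by simp)
  intro x hx y hy
  by_cases hxy : x = y
  · subst hxy; simp
  · have hne : k1 x ≠ k1 y := fun e => hxy (h x hx y hy e)
    rcases lt_trichotomy (k1 x) (k1 y) with h' | h' | h'
    · simp [h']
    · exact absurd h' hne
    · simp [not_lt.2 (le_of_lt h'), h']

-- A's counting loop is Counter(keys)
theorem pv_loop_eq_counter (lista : List (List String)) (indice amplitude : Int) :
    lista.foldl (fun d obra =>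
      let intervalo := pvIntervalo obra indice amplitude
      match d.get? intervalo with
      | some n => d.insert intervalo (n + 1)
      | none   => d.insert intervalo 1) (PySem.Dict.empty : PySem.Dict String Int)
    = PySem.Dict.counter (lista.map (fun obra => pvIntervalo obra indice amplitude)) := by
  rw [← PySem.Dict.foldl_insert_getD_add_one_eq_counter, List.foldl_map]
  congr 1
  funext d obra
  cases h : d.get? (pvIntervalo obra indice amplitude) with
  | some n => simp [h, PySem.Dict.getD]
  | none => simp [h, PySem.Dict.getD]

-- in a ≤-chain bounded below by x, everything after the leading run of x is > x
theorem pv_drop_aux (x : String) : ∀ (t : List String), (∀ y ∈ t, x ≤ y) → t.Pairwise (· ≤ ·) →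
    ∀ z ∈ t.dropWhile (fun y => y == x), x < z := by
  intro t
  induction t with
  | nil => intro _ _ z hz; simp at hz
  | cons a r ih =>
    intro hle hp z hz
    by_cases ha : a = x
    · rw [List.dropWhile_cons_of_pos (by simp [ha])] at hz
      exact ih (fun y hy => hle y (List.mem_cons_of_mem a hy)) (List.pairwise_cons.1 hp).2 z hz
    · rw [List.dropWhile_cons_of_neg (by simp [ha])] at hz
      have hxa : x < a := lt_of_le_of_ne (hle a (by simp)) (Ne.symm ha)
      rcases List.mem_cons.1 hz with rfl | hz'
      · exact hxa
      · exact lt_of_lt_of_le hxa ((List.pairwise_cons.1 hp).1 z hz')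

theorem pv_chain_drop (x : String) (t : List String) (hl : (x :: t).Pairwise (· ≤ ·)) :
    ∀ z ∈ t.dropWhile (fun y => y == x), x < z :=
  pv_drop_aux x t (List.pairwise_cons.1 hl).1 (List.pairwise_cons.1 hl).2

theorem pv_chain_count_head (x : String) (t : List String) (hl : (x :: t).Pairwise (· ≤ ·)) :
    List.count x (x :: t) = 1 + (t.takeWhile (fun y => y == x)).length := by
  have ht : t = t.takeWhile (fun y => y == x) ++ t.dropWhile (fun y => y == x) :=
    (List.takeWhile_append_dropWhile).symm
  have h1 : List.count x (t.takeWhile (fun y => y == x)) = (t.takeWhile (fun y => y == x)).length :=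
    List.count_eq_length.2 (fun b hb => by have := List.mem_takeWhile_imp hb; simp at this; exact this.symm)
  have h2 : List.count x (t.dropWhile (fun y => y == x)) = 0 :=
    List.count_eq_zero.2 (fun hx => lt_irrefl x (pv_chain_drop x t hl x hx))
  rw [List.count_cons_self]
  conv_lhs => rw [ht]
  rw [List.count_append, h1, h2]
  omega

theorem pv_chain_count_rest (x : String) (t : List String) (hl : (x :: t).Pairwise (· ≤ ·))
    (k : String) (hk : k ∈ t.dropWhile (fun y => y == x)) :
    List.count k (x :: t) = List.count k (t.dropWhile (fun y => y == x)) := by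
  have hkx : k ≠ x := ne_of_gt (pv_chain_drop x t hl k hk)
  have ht : t = t.takeWhile (fun y => y == x) ++ t.dropWhile (fun y => y == x) :=
    (List.takeWhile_append_dropWhile).symm
  have h1 : List.count k (t.takeWhile (fun y => y == x)) = 0 :=
    List.count_eq_zero.2 (fun hx => by
      have := List.mem_takeWhile_imp hx; simp at this; exact hkx this)
  rw [List.count_cons_of_ne hkx.symm]
  conv_lhs => rw [ht]
  rw [List.count_append, h1]
  omega

-- membership characterisation of the run-length grouping of a sorted list
theorem pv_runs_mem : ∀ (l : List String), l.Pairwise (· ≤ ·) → ∀ (p : String × Int),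
    (p ∈ pvRuns l ↔ p.1 ∈ l ∧ p.2 = (List.count p.1 l : Int)) := by
  intro l
  induction l using pvRuns.induct with
  | case1 => intro _ p; simp [pvRuns]
  | case2 x t IH =>
    intro hl p
    have hD : (t.dropWhile (fun y => y == x)).Pairwise (· ≤ ·) :=
      (List.pairwise_cons.1 hl).2.sublist (List.dropWhile_sublist _)
    have hmemD : ∀ z ∈ t.dropWhile (fun y => y == x), z ∈ t :=
      fun z hz => (List.dropWhile_sublist _).mem hz
    rw [pvRuns]
    simp only [List.mem_cons]
    constructor
    · rintro (rfl | hp)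
      · refine ⟨Or.inl rfl, ?_⟩
        show ((1 : Nat) + (t.takeWhile (fun y => y == x)).length : Int) = (List.count x (x :: t) : Int)
        rw [pv_chain_count_head x t hl]
        push_cast; ring
      · obtain ⟨h1, h2⟩ := (IH hD p).1 hp
        refine ⟨Or.inr (hmemD _ h1), ?_⟩
        rw [pv_chain_count_rest x t hl p.1 h1]; exact h2
    · rintro ⟨h1, h2⟩
      by_cases hx : p.1 = x
      · left
        have hv : p.2 = ((1 : Int) + ((t.takeWhile (fun y => y == x)).length : Int)) := by
          rw [h2, hx, pv_chain_count_head x t hl]; push_cast; ring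
        obtain ⟨p1, p2⟩ := p
        simp only at hx hv ⊢
        rw [hx, hv]; norm_num
      · right
        have hpt : p.1 ∈ t := h1.resolve_left hx
        have hpD : p.1 ∈ t.dropWhile (fun y => y == x) := by
          rcases List.mem_append.1 (by rw [List.takeWhile_append_dropWhile]; exact hpt :
            p.1 ∈ t.takeWhile (fun y => y == x) ++ t.dropWhile (fun y => y == x)) with h | h
          · exact absurd (by have := List.mem_takeWhile_imp h; simpa using this) hx
          · exact h
        exact (IH hD p).2 ⟨hpD, by rw [← pv_chain_count_rest x t hl p.1 hpD]; exact h2⟩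

theorem pv_runs_pairwise : ∀ (l : List String), l.Pairwise (· ≤ ·) →
    (pvRuns l).Pairwise (fun a b => a.1 < b.1) := by
  intro l
  induction l using pvRuns.induct with
  | case1 => intro _; simp [pvRuns]
  | case2 x t IH =>
    intro hl
    have hD : (t.dropWhile (fun y => y == x)).Pairwise (· ≤ ·) :=
      (List.pairwise_cons.1 hl).2.sublist (List.dropWhile_sublist _)
    rw [pvRuns]
    refine List.pairwise_cons.2 ⟨?_, IH hD⟩
    intro q hq
    have := ((pv_runs_mem _ hD q).1 hq).1
    exact pv_chain_drop x t hl q.1 this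

-- the central identity: sorted items of Counter(keys) = run-grouping of sorted keys
theorem pv_central (keys : List String) :
    PySem.List.sorted (PySem.Dict.counter keys).items (fun kv => kv.1) false
      = pvRuns (PySem.List.sorted keys (fun x => x) false) := by
  set l := PySem.List.sorted keys (fun x => x) false with hldef
  have hl : l.Pairwise (· ≤ ·) := by
    simpa using PySem.List.sorted_pairwise keys (fun x => x)
  have hperm : (PySem.List.sorted keys (fun x => x) false).Perm keys := PySem.List.sorted_perm _ _ _
  have hcount : ∀ k, List.count k l = List.count k keys := fun k => hperm.count_eq k
  have hitems : (PySem.Dict.counter keys).items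
      = (PySem.Set.ofList keys).map (fun k => (k, (List.count k keys : Int))) :=
    PySem.Dict.items_counter keys
  apply PySem.List.sorted_eq_of_perm_of_pairwise_lt
  · have hn1 : (pvRuns l).Nodup := by
      have := pv_runs_pairwise l hl
      exact this.imp (fun {a b} h => fun e => absurd (e ▸ h) (lt_irrefl _))
    have hn2 : (PySem.Dict.counter keys).items.Nodup := by
      rw [hitems]
      exact (PySem.Set.nodup_ofList keys).map (fun a b e => congrArg Prod.fst e)
    rw [List.perm_ext_iff_of_nodup hn1 hn2]
    intro p
    rw [pv_runs_mem l hl p, hitems, List.mem_map]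
    constructor
    · rintro ⟨h1, h2⟩
      refine ⟨p.1, (PySem.Set.mem_ofList keys p.1).2 ?_, ?_⟩
      · rw [← hperm.mem_iff]; exact h1
      · obtain ⟨p1, p2⟩ := p
        simp only at h2 ⊢
        rw [← hcount p1] at *
        exact Prod.ext rfl (by simpa using h2.symm)
    · rintro ⟨k, hk, rfl⟩
      refine ⟨?_, by simpa using (hcount k).symm ▸ rfl⟩
      · have : k ∈ keys := (PySem.Set.mem_ofList keys k).1 hk
        rw [hperm.mem_iff]; exact this
  · exact pv_runs_pairwise l hl

-- ===== VERDICT (by name: the statement is the Claim_ definition above) =====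
theorem distribuicao_spec : Claim_equal_distribuicao := by
  intro lista indice amplitude _ _
  unfold Spec_distribuicao distribuicao distribuicao_alt
  rw [pv_loop_eq_counter]
  rw [pv_sorted2_eq_sorted _ _ _ ?inj]
  case inj =>
    intro x hx y hy hxy
    rw [PySem.Dict.items_counter] at hx hy
    obtain ⟨a, _, rfl⟩ := List.mem_map.1 hx
    obtain ⟨b, _, rfl⟩ := List.mem_map.1 hy
    simp_all
  exact pv_central _
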